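-- pv_equiv track=rewrite | github.com/Yulian302/leetcode | problems/difference_array/Other. Street lights.py | find_brightest_position
-- ===== SOURCE A (Python) =====
-- def find_brightest_position(lights: list[list[int]]) -> int:
--     change = []
--     for position, radius in lights:
--         change.append([position - radius, 1])
--         change.append([position + radius + 1, -1])
--
--     change.sort()
--     ans = curr = brightest = 0
--     for position, value in change:
--         curr += value
--         if curr > brightest:
--             brightest = curr
--             ans = position
--
--     return ans
-- ===== SOURCE B (Python) =====
-- def find_brightest_position(lights: list[list[int]]) -> int:
--     starts = sorted(position - radius for position, radius in lights)
--     ends = sorted(position + radius + 1 for position, radius in lights)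
--     i = j = 0
--     curr = brightest = ans = 0
--     while i < len(starts):
--         if j < len(ends) and ends[j] <= starts[i]:
--             curr -= 1
--             j += 1
--         else:
--             curr += 1
--             if curr > brightest:
--                 brightest = curr
--                 ans = starts[i]
--             i += 1
--     return ans
-- ===== Notes on version B (the rewrite author's own statement) =====
-- stated objective: alternative
-- what changed: Instead of building one combined [position, delta] event list and lex-sorting it, B sorts the start coordinates and the end coordinates into two separate lists and merges them with two pointers, updating the running maximum only on start events and stopping as soon as all starts are consumed.
import Mathlib
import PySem

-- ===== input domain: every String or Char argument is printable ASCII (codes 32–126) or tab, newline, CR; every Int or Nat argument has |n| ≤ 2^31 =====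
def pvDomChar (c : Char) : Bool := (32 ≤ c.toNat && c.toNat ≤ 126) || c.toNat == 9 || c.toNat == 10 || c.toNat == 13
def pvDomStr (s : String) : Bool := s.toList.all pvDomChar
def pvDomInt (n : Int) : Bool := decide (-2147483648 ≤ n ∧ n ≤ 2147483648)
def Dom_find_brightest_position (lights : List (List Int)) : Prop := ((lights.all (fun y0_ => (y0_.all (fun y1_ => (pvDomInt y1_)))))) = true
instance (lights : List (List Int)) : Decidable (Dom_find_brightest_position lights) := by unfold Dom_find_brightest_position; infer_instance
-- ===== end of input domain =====

-- B replaces A's single lex-sorted [position, delta] event list by two separately sorted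
-- start/end coordinate lists merged with two pointers (max updated only on starts).


-- ===== PORT A =====
-- 'for position, radius in lights' unpacks a 2-list; Pre_ guarantees every inner list has
-- length 2, so pyGetD l 0 0 / pyGetD l 1 0 are exactly that unpacking.
-- 'change.sort()' on 2-lists is exactly the lexicographic sort by (fst, snd), i.e. sorted2.
def aStep (s : Int × Int × Int) (pv : Int × Int) : Int × Int × Int :=
  let curr := s.2.1 + pv.2
  if curr > s.2.2 then (pv.1, curr, curr) else (s.1, curr, s.2.2)

def find_brightest_position (lights : List (List Int)) : Int :=
  let change := lights.foldl (fun acc l =>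
    acc ++ [(PySem.List.pyGetD l 0 0 - PySem.List.pyGetD l 1 0, (1 : Int)),
            (PySem.List.pyGetD l 0 0 + PySem.List.pyGetD l 1 0 + 1, (-1 : Int))]) []
  let sortedChange := PySem.List.sorted2 change Prod.fst Prod.snd false
  (sortedChange.foldl aStep (0, 0, 0)).1

-- ===== PORT B =====
-- the while loop of Source B: state (curr, brightest, ans), two pointers realised as the
-- unconsumed suffixes of the two sorted lists
def bLoop (ss es : List Int) (curr brightest ans : Int) : Int :=
  match ss, es with
  | [], _ => ans
  | s :: ss', e :: es' =>
      if e ≤ s then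
        bLoop (s :: ss') es' (curr - 1) brightest ans
      else
        let c := curr + 1
        if c > brightest then bLoop ss' (e :: es') c c s
        else bLoop ss' (e :: es') c brightest ans
  | s :: ss', [] =>
      let c := curr + 1
      if c > brightest then bLoop ss' [] c c s
      else bLoop ss' [] c brightest ans
termination_by ss.length + es.length

def find_brightest_position_alt (lights : List (List Int)) : Int :=
  let starts := PySem.List.sorted
    (lights.map (fun l => PySem.List.pyGetD l 0 0 - PySem.List.pyGetD l 1 0)) (fun x => x) false
  let ends := PySem.List.sorted
    (lights.map (fun l => PySem.List.pyGetD l 0 0 + PySem.List.pyGetD l 1 0 + 1)) (fun x => x) false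
  bLoop starts ends 0 0 0

-- ===== PRECONDITION & SPEC =====
-- Pre_: every inner list has exactly two elements; on any other inner list the Python A
-- raises ValueError at the 'for position, radius in lights' unpacking.
def Pre_find_brightest_position (lights : List (List Int)) : Prop :=
  ∀ l ∈ lights, l.length = 2
instance (lights : List (List Int)) : Decidable (Pre_find_brightest_position lights) := by
  unfold Pre_find_brightest_position; infer_instance

def pvWitness_find_brightest_position : List (List Int) := [[1, 2], [3, 0], [-2, 1]]

def Spec_find_brightest_position (lights : List (List Int)) (out : Int) : Prop :=
  out = find_brightest_position_alt lights
instance (lights : List (List Int)) (out : Int) : Decidable (Spec_find_brightest_position lights out) := by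
  unfold Spec_find_brightest_position; infer_instance

-- ===== CLAIM (what is proved, stated in full; the proofs are below) =====
def Claim_equal_find_brightest_position : Prop :=
  ∀ (lights : List (List Int)), Dom_find_brightest_position lights →
    Pre_find_brightest_position lights →
    Spec_find_brightest_position lights (find_brightest_position lights)

-- ===== LEMMAS AND PROOFS =====

-- the comparison sorted2 uses on our (position, delta) pairs, and its ≤ companion
def lexLt (a b : Int × Int) : Bool :=
  decide (a.1 < b.1) || (!decide (b.1 < a.1) && decide (a.2 < b.2))

def lexLe (a b : Int × Int) : Prop := a.1 < b.1 ∨ (a.1 = b.1 ∧ a.2 ≤ b.2)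

theorem sorted2_unfold (xs : List (Int × Int)) :
    PySem.List.sorted2 xs Prod.fst Prod.snd false =
      xs.foldl (fun acc x => PySem.List.insertBy lexLt x acc) [] := rfl

theorem lexLe_trans {x y z : Int × Int} (h1 : lexLe x y) (h2 : lexLe y z) : lexLe x z := by
  unfold lexLe at *; omega

theorem pairwise_insertBy (x : Int × Int) (ys : List (Int × Int))
    (h : ys.Pairwise lexLe) : (PySem.List.insertBy lexLt x ys).Pairwise lexLe := by
  induction ys with
  | nil => simp [PySem.List.insertBy]
  | cons y ys ih =>
    rw [List.pairwise_cons] at h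
    by_cases hb : lexLt x y = true
    · have hxy : lexLe x y := by unfold lexLe; simp [lexLt] at hb; omega
      have hins : (PySem.List.insertBy lexLt x (y :: ys)) = x :: y :: ys := by
        simp [PySem.List.insertBy, hb]
      rw [hins, List.pairwise_cons]
      refine ⟨?_, List.pairwise_cons.mpr h⟩
      intro z hz
      rcases List.mem_cons.mp hz with rfl | hz
      · exact hxy
      · exact lexLe_trans hxy (h.1 z hz)
    · have hyx : lexLe y x := by unfold lexLe; simp [lexLt] at hb; omega
      have hins : (PySem.List.insertBy lexLt x (y :: ys)) = y :: PySem.List.insertBy lexLt x ys := by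
        simp [PySem.List.insertBy, hb]
      rw [hins, List.pairwise_cons]
      refine ⟨?_, ih h.2⟩
      intro z hz
      rcases (PySem.List.mem_insertBy lexLt x z ys).mp hz with rfl | hz'
      · exact hyx
      · exact h.1 z hz'

theorem pairwise_foldl_insertBy (xs acc : List (Int × Int))
    (h : acc.Pairwise lexLe) :
    (xs.foldl (fun acc x => PySem.List.insertBy lexLt x acc) acc).Pairwise lexLe := by
  induction xs generalizing acc with
  | nil => simpa using h
  | cons x xs ih => exact ih _ (pairwise_insertBy x acc h)

theorem perm_foldl_insertBy (xs acc : List (Int × Int)) :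
    (xs.foldl (fun acc x => PySem.List.insertBy lexLt x acc) acc).Perm (acc ++ xs) := by
  induction xs generalizing acc with
  | nil => simp
  | cons x xs ih =>
    refine (ih (PySem.List.insertBy lexLt x acc)).trans ?_
    have h1 : (PySem.List.insertBy lexLt x acc).Perm (x :: acc) := by
      have : ∀ z, z ∈ PySem.List.insertBy lexLt x acc ↔ z ∈ x :: acc := by
        intro z; rw [PySem.List.mem_insertBy]; simp
      -- insertBy inserts exactly one copy of x: prove the permutation structurally
      clear this
      induction acc with
      | nil => simp [PySem.List.insertBy]
      | cons y ys ihy =>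
        by_cases hb : lexLt x y = true
        · simp [PySem.List.insertBy, hb]
        · simp only [PySem.List.insertBy, hb]
          refine List.Perm.trans (List.Perm.cons y ihy) ?_
          exact List.Perm.swap x y ys
    refine (List.Perm.append_right xs h1).trans ?_
    have : (x :: acc) ++ xs = x :: (acc ++ xs) := rfl
    rw [this]
    exact (List.perm_middle).symm

-- any lexLe-pairwise rearrangement IS the lex sort (elements are their own keys)
theorem sorted2_eq_of_perm_of_pairwise (xs ys : List (Int × Int))
    (hp : ys.Perm xs) (hs : ys.Pairwise lexLe) :
    PySem.List.sorted2 xs Prod.fst Prod.snd false = ys := by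
  rw [sorted2_unfold]
  apply List.Perm.eq_of_pairwise (le := lexLe)
  · intro a b _ _ h1 h2
    rcases a with ⟨a1, a2⟩; rcases b with ⟨b1, b2⟩
    unfold lexLe at h1 h2; simp at h1 h2 ⊢; omega
  · exact pairwise_foldl_insertBy xs [] (by simp)
  · exact hs
  · exact ((perm_foldl_insertBy xs []).trans (by simp)).trans hp.symm

-- the merged event stream B walks: ends (delta -1) before starts (delta +1) on ties
def mergeEv (ss es : List Int) : List (Int × Int) :=
  match ss, es with
  | ss, [] => ss.map (fun s => (s, 1))
  | [], e :: es' => (e, -1) :: mergeEv [] es'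
  | s :: ss', e :: es' =>
      if e ≤ s then (e, -1) :: mergeEv (s :: ss') es'
      else (s, 1) :: mergeEv ss' (e :: es')
termination_by ss.length + es.length

theorem mergeEv_perm (ss es : List Int) :
    (mergeEv ss es).Perm (ss.map (fun s => (s, 1)) ++ es.map (fun e => (e, -1))) := by
  fun_induction mergeEv with
  | case1 ss => simp
  | case2 e es' ih => simpa using (List.Perm.cons (e, -1) ih)
  | case3 s ss' e es' h ih =>
    refine List.Perm.trans (List.Perm.cons (e, -1) ih) ?_
    simpa using (List.perm_middle (a := ((e : Int), (-1 : Int)))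
      (l₁ := (s, 1) :: ss'.map (fun s => (s, 1))) (l₂ := es'.map (fun e => (e, -1)))).symm
  | case4 s ss' e es' h ih => simpa using (List.Perm.cons (s, 1) ih)

theorem mergeEv_pairwise (ss es : List Int)
    (hss : ss.Pairwise (· ≤ ·)) (hes : es.Pairwise (· ≤ ·)) :
    (mergeEv ss es).Pairwise lexLe := by
  fun_induction mergeEv with
  | case1 ss =>
    exact List.pairwise_map.mpr (hss.imp (fun h => by unfold lexLe; simp; omega))
  | case2 e es' ih =>
    rw [List.pairwise_cons] at hes
    refine List.pairwise_cons.mpr ⟨?_, ih hss hes.2⟩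
    intro z hz
    have hz' := (mergeEv_perm [] es').mem_iff.mp hz
    simp only [List.map_nil, List.nil_append] at hz'
    obtain ⟨e', he', rfl⟩ := List.mem_map.mp hz'
    have := hes.1 e' he'
    unfold lexLe; simp; omega
  | case3 s ss' e es' h ih =>
    rw [List.pairwise_cons] at hes
    refine List.pairwise_cons.mpr ⟨?_, ih hss hes.2⟩
    intro z hz
    have hz' := (mergeEv_perm (s :: ss') es').mem_iff.mp hz
    rcases List.mem_append.mp hz' with hm | hm
    · obtain ⟨s', hs', rfl⟩ := List.mem_map.mp hm
      have hes' : e ≤ s' := by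
        rcases List.mem_cons.mp hs' with heq | hs'
        · omega
        · exact le_trans h ((List.pairwise_cons.mp hss).1 s' hs')
      unfold lexLe; simp; omega
    · obtain ⟨e', he', rfl⟩ := List.mem_map.mp hm
      have := hes.1 e' he'
      unfold lexLe; simp; omega
  | case4 s ss' e es' h ih =>
    rw [List.pairwise_cons] at hss
    refine List.pairwise_cons.mpr ⟨?_, ih hss.2 hes⟩
    intro z hz
    have hz' := (mergeEv_perm ss' (e :: es')).mem_iff.mp hz
    rcases List.mem_append.mp hz' with hm | hm
    · obtain ⟨s', hs', rfl⟩ := List.mem_map.mp hm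
      have := hss.1 s' hs'
      unfold lexLe; simp; omega
    · obtain ⟨e', he', rfl⟩ := List.mem_map.mp hm
      have hee' : e ≤ e' := by
        rcases List.mem_cons.mp he' with heq | he'
        · omega
        · exact (List.pairwise_cons.mp hes).1 e' he'
      unfold lexLe; simp; omega

-- folding A's body over the merged stream IS B's two-pointer loop, given curr ≤ brightest
theorem fold_mergeEv_eq_bLoop (ss es : List Int) (ans curr brightest : Int)
    (hinv : curr ≤ brightest) :
    ((mergeEv ss es).foldl aStep (ans, curr, brightest)).1 =
      bLoop ss es curr brightest ans := by
  fun_induction mergeEv ss es generalizing ans curr brightest with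
  | case1 ss =>
    induction ss generalizing ans curr brightest with
    | nil => simp [bLoop]
    | cons s ss' ihs =>
      simp only [List.map_cons, List.foldl_cons, bLoop, aStep]
      by_cases hgt : curr + 1 > brightest
      · simp only [if_pos hgt]; exact ihs s (curr + 1) (curr + 1) (le_refl _)
      · simp only [if_neg hgt]; exact ihs ans (curr + 1) brightest (by omega)
  | case2 e es' ih =>
    simp only [List.foldl_cons, bLoop, aStep]
    have hgt : ¬ (curr + -1 > brightest) := by omega
    simp only [if_neg hgt]
    exact (ih ans (curr + -1) brightest (by omega)).trans (by simp [bLoop])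
  | case3 s ss' e es' h ih =>
    simp only [List.foldl_cons, bLoop, aStep, if_pos h]
    have hgt : ¬ (curr + -1 > brightest) := by omega
    simp only [if_neg hgt]
    have := ih ans (curr + -1) brightest (by omega)
    simpa [sub_eq_add_neg] using this
  | case4 s ss' e es' h ih =>
    simp only [List.foldl_cons, bLoop, aStep, if_neg h]
    by_cases hgt : curr + 1 > brightest
    · simp only [if_pos hgt]; exact ih s (curr + 1) (curr + 1) (le_refl _)
    · simp only [if_neg hgt]; exact ih ans (curr + 1) brightest (by omega)

-- A's change list is a rearrangement of starts-with-delta-1 ++ ends-with-delta-(-1)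
theorem change_perm (lights : List (List Int)) (acc : List (Int × Int)) :
    (lights.foldl (fun acc l =>
      acc ++ [(PySem.List.pyGetD l 0 0 - PySem.List.pyGetD l 1 0, (1 : Int)),
              (PySem.List.pyGetD l 0 0 + PySem.List.pyGetD l 1 0 + 1, (-1 : Int))]) acc).Perm
    (acc ++ (lights.map (fun l => PySem.List.pyGetD l 0 0 - PySem.List.pyGetD l 1 0)).map (fun s => (s, 1))
         ++ (lights.map (fun l => PySem.List.pyGetD l 0 0 + PySem.List.pyGetD l 1 0 + 1)).map (fun e => (e, -1))) := by
  induction lights generalizing acc with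
  | nil => simp
  | cons l ls ih =>
    simp only [List.foldl_cons, List.map_cons]
    refine (ih _).trans ?_
    simp only [List.append_assoc, List.cons_append, List.nil_append]
    refine List.Perm.append_left acc ?_
    exact List.Perm.cons _ (List.perm_middle).symm

theorem sorted_change_eq (lights : List (List Int)) :
    PySem.List.sorted2
      (lights.foldl (fun acc l =>
        acc ++ [(PySem.List.pyGetD l 0 0 - PySem.List.pyGetD l 1 0, (1 : Int)),
                (PySem.List.pyGetD l 0 0 + PySem.List.pyGetD l 1 0 + 1, (-1 : Int))]) [])
      Prod.fst Prod.snd false =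
    mergeEv
      (PySem.List.sorted (lights.map (fun l => PySem.List.pyGetD l 0 0 - PySem.List.pyGetD l 1 0)) (fun x => x) false)
      (PySem.List.sorted (lights.map (fun l => PySem.List.pyGetD l 0 0 + PySem.List.pyGetD l 1 0 + 1)) (fun x => x) false) := by
  set starts := lights.map (fun l => PySem.List.pyGetD l 0 0 - PySem.List.pyGetD l 1 0) with hst
  set ends := lights.map (fun l => PySem.List.pyGetD l 0 0 + PySem.List.pyGetD l 1 0 + 1) with hen
  apply sorted2_eq_of_perm_of_pairwise
  · refine (mergeEv_perm _ _).trans ?_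
    refine List.Perm.trans ?_ ((change_perm lights []).symm.trans (by simp))
    simp only [List.nil_append]
    exact List.Perm.append
      (List.Perm.map _ (PySem.List.sorted_perm starts (fun x => x) false))
      (List.Perm.map _ (PySem.List.sorted_perm ends (fun x => x) false))
  · exact mergeEv_pairwise _ _
      (PySem.List.sorted_pairwise starts (fun x => x))
      (PySem.List.sorted_pairwise ends (fun x => x))

-- ===== VERDICT (by name: the statement is the Claim_ definition above) =====
theorem find_brightest_position_spec : Claim_equal_find_brightest_position := by
  intro lights _ _
  unfold Spec_find_brightest_position find_brightest_position find_brightest_position_alt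
  simp only []
  rw [sorted_change_eq lights]
  exact fold_mergeEv_eq_bLoop _ _ 0 0 0 (le_refl 0)
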